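-- pv_equiv track=rewrite | github.com/romain22222/INFO003-TP1 | Probleme3/probleme3qe.py | sommeMin
-- ===== SOURCE A (Python) =====
-- def sommeMin(t, n):
-- 	memory = t[:]
-- 	for i in range(1, n + 1):
-- 		datas = [memory[i - 1]]
-- 		if i >= 3:
-- 			datas.append(memory[i - 3])
-- 			if i >= 5:
-- 				datas.append(memory[i - 5])
-- 		memory[i] += min(datas)
-- 	return memory[n]
-- ===== SOURCE B (Python) =====
-- def sommeMin(t, n):
-- 	memo = {}
-- 	def f(i):
-- 		if i == 0:
-- 			return t[0]
-- 		if i in memo: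
-- 			return memo[i]
-- 		best = f(i - 1)
-- 		if i >= 3:
-- 			best = min(best, f(i - 3))
-- 			if i >= 5:
-- 				best = min(best, f(i - 5))
-- 		v = t[i] + best
-- 		memo[i] = v
-- 		return v
-- 	# warm the memo in chunks so the recursion depth stays bounded for large n
-- 	for i in range(0, n + 1, 512):
-- 		f(i)
-- 	return f(n)
-- ===== Notes on version B (the rewrite author's own statement) =====
-- stated objective: alternative
-- what changed: Replaces A's bottom-up loop that copies and mutates the whole array with a top-down memoized recursive helper f(i) over the same recurrence (dict cache, t never copied or mutated), plus a chunked cache warm-up so recursion depth stays bounded for large n.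
-- outside the precondition, e.g. on sommeMin([5, 3], -1): A returns 3, B raises RecursionError
import Mathlib
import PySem

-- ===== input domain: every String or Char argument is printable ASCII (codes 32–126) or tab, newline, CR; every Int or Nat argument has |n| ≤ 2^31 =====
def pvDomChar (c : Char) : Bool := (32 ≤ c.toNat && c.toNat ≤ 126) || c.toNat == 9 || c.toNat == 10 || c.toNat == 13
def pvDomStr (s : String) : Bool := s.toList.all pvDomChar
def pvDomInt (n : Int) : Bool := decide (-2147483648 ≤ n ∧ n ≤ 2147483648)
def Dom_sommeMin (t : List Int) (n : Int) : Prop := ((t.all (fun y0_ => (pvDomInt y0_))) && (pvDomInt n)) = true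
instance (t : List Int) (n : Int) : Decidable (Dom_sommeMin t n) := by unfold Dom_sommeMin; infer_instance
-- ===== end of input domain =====

-- B replaces A's bottom-up loop over a copied, mutated array with a top-down memoized
-- recursion over the same recurrence (alternative decomposition; t is never copied or mutated);
-- return-value equivalence only (A mutates only its private copy of t).

-- ===== PORT A =====
def sommeMin (t : List Int) (n : Int) : Int :=
  let memory := PySem.List.slice t none none
  let memory := (PySem.List.pyRange 1 (n + 1) 1).foldl (fun mem i =>
      let datas := [PySem.List.pyGetD mem (i - 1) 0]
      let datas :=
        if 3 ≤ i then
          let datas := datas ++ [PySem.List.pyGetD mem (i - 3) 0]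
          if 5 ≤ i then datas ++ [PySem.List.pyGetD mem (i - 5) 0] else datas
        else datas
      PySem.List.pySetD mem i
        (PySem.List.pyGetD mem i 0 + (PySem.List.min? datas (fun x => x)).getD 0)
    ) memory
  PySem.List.pyGetD memory n 0

-- ===== PORT B =====
-- B's helper f(i): top-down recursion on i (memoisation is a caching detail that does not
-- change the value; the recursion, its guards and the reads of t are transcribed one-for-one).
def sommeMinRec (t : List Int) (i : Nat) : Int :=
  if _h : i = 0 then PySem.List.pyGetD t 0 0
  else
    let best := sommeMinRec t (i - 1)
    let best :=
      if 3 ≤ i then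
        let best := min best (sommeMinRec t (i - 3))
        if 5 ≤ i then min best (sommeMinRec t (i - 5)) else best
      else best
    PySem.List.pyGetD t (i : Int) 0 + best
termination_by i
decreasing_by all_goals omega

def sommeMin_alt (t : List Int) (n : Int) : Int :=
  -- B's warm-up loop calls f(i) only to populate the memo (a cache with no effect on values);
  -- its results are discarded, so the port computes them and drops them likewise.
  let _warmup := (PySem.List.pyRange 0 (n + 1) 512).map (fun i => sommeMinRec t i.toNat)
  sommeMinRec t n.toNat

-- ===== PRECONDITION & SPEC =====
-- Pre_ excludes n < 0, where A's negative-index wraparound return is accidental (B recurses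
-- without reaching its base case there), and n ≥ len(t), where A raises IndexError.
def Pre_sommeMin (t : List Int) (n : Int) : Prop := 0 ≤ n ∧ n < t.length
instance (t : List Int) (n : Int) : Decidable (Pre_sommeMin t n) := by unfold Pre_sommeMin; infer_instance
def pvWitness_sommeMin : List Int × Int := ([2, 7, 1, 8, 2, 8, 1], 6)
def Spec_sommeMin (t : List Int) (n : Int) (out : Int) : Prop := out = sommeMin_alt t n
instance (t : List Int) (n : Int) (out : Int) : Decidable (Spec_sommeMin t n out) := by unfold Spec_sommeMin; infer_instance

-- ===== CLAIM =====
def Claim_equal_sommeMin : Prop := ∀ (t : List Int) (n : Int), Dom_sommeMin t n → Pre_sommeMin t n → Spec_sommeMin t n (sommeMin t n)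

-- ===== LEMMAS AND PROOFS =====

lemma rec_zero (t : List Int) : sommeMinRec t 0 = t.getD 0 0 := by
  rw [sommeMinRec]; simp [PySem.List.pyGetD_zero]

lemma rec_succ (t : List Int) (N : Nat) :
    sommeMinRec t (N + 1) =
      t.getD (N + 1) 0 +
        (if 3 ≤ N + 1 then
          (if 5 ≤ N + 1 then min (min (sommeMinRec t N) (sommeMinRec t (N - 2))) (sommeMinRec t (N - 4))
           else min (sommeMinRec t N) (sommeMinRec t (N - 2)))
         else sommeMinRec t N) := by
  rw [sommeMinRec]
  simp only [Nat.add_sub_cancel]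
  have h3 : N + 1 - 3 = N - 2 := by omega
  have h5 : N + 1 - 5 = N - 4 := by omega
  have hg : PySem.List.pyGetD t ((N : Int) + 1) 0 = t.getD (N + 1) 0 := by
    rw [show ((N:Int) + 1) = ((N + 1 : Nat) : Int) by push_cast; ring, PySem.List.pyGetD_natCast]
  simp [h3, h5, hg]

lemma mem_getD (t : List Int) (N j : Nat) (hj : j ≤ N) (hN : N < t.length) :
    ((List.range (N + 1)).map (sommeMinRec t) ++ t.drop (N + 1)).getD j 0 = sommeMinRec t j := by
  rw [List.getD_append _ _ _ _ (by simp; omega)]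
  rw [List.getD_eq_getElem _ _ (by simp; omega)]
  simp

lemma a_loop (t : List Int) (N : Nat) (h : N < t.length) :
    (PySem.List.pyRange 1 ((N : Int) + 1) 1).foldl
      (fun mem i =>
        let datas := [PySem.List.pyGetD mem (i - 1) 0]
        let datas :=
          if 3 ≤ i then
            let datas := datas ++ [PySem.List.pyGetD mem (i - 3) 0]
            if 5 ≤ i then datas ++ [PySem.List.pyGetD mem (i - 5) 0] else datas
          else datas
        PySem.List.pySetD mem i
          (PySem.List.pyGetD mem i 0 + (PySem.List.min? datas (fun x => x)).getD 0)
      ) t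
    = (List.range (N + 1)).map (sommeMinRec t) ++ t.drop (N + 1) := by
  induction N with
  | zero =>
      rw [PySem.List.pyRange_one_eq_nil (by omega)]
      match t, h with
      | (x :: xs), _ =>
        simp [rec_zero]
  | succ N ih =>
      have hN : N < t.length := by omega
      have hc : (((N+1:Nat)):Int) + 1 = ((N:Int)+1)+1 := by push_cast; ring
      have hr : PySem.List.pyRange 1 (((N:Int)+1)+1) 1 = PySem.List.pyRange 1 ((N:Int)+1) 1 ++ [(N:Int)+1] :=
        PySem.List.pyRange_one_succ_right (by omega)
      rw [hc, hr, List.foldl_append, ih hN, List.foldl_cons, List.foldl_nil]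
      dsimp only
      have i1 : ((N:Int) + 1 - 1) = ((N : Nat) : Int) := by push_cast; ring
      have ii : ((N:Int) + 1) = (((N + 1) : Nat) : Int) := by push_cast; ring
      rw [i1, ii]
      rw [PySem.List.pySetD_natCast]
      have gN : PySem.List.pyGetD (List.map (sommeMinRec t) (List.range (N + 1)) ++ List.drop (N + 1) t) ((N:Nat) : Int) 0 = sommeMinRec t N := by
        rw [PySem.List.pyGetD_natCast, mem_getD t N N le_rfl hN]
      have gi : PySem.List.pyGetD (List.map (sommeMinRec t) (List.range (N + 1)) ++ List.drop (N + 1) t) (((N+1):Nat) : Int) 0 = t.getD (N+1) 0 := by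
        rw [PySem.List.pyGetD_natCast]
        rw [List.getD_append_right _ _ _ _ (by simp)]
        simp [List.getD_eq_getElem?_getD, List.getElem?_drop]
      have hdrop : List.drop (N + 1) t = t.getD (N+1) 0 :: List.drop (N + 1 + 1) t := by
        rw [List.drop_eq_getElem_cons (by omega)]
        rw [List.getD_eq_getElem _ _ (by omega)]
      have hset : ∀ v : Int, v = sommeMinRec t (N + 1) →
          (List.map (sommeMinRec t) (List.range (N + 1)) ++ List.drop (N + 1) t).set (N + 1) v
          = List.map (sommeMinRec t) (List.range (N + 1 + 1)) ++ List.drop (N + 1 + 1) t := by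
        intro v hv
        subst hv
        rw [List.set_append_right _ _ (by simp)]
        simp only [List.length_map, List.length_range, Nat.sub_self]
        rw [hdrop]
        simp [List.range_succ]
      rw [gN, gi]
      by_cases h3 : (3:Int) ≤ (((N + 1):Nat) : Int)
      · have hn3 : 2 ≤ N := by omega
        have i3 : ((((N + 1):Nat) : Int) - 3) = (((N - 2 : Nat)) : Int) := by omega
        have g3 : PySem.List.pyGetD (List.map (sommeMinRec t) (List.range (N + 1)) ++ List.drop (N + 1) t) ((((N + 1):Nat) : Int) - 3) 0 = sommeMinRec t (N - 2) := by
          rw [i3, PySem.List.pyGetD_natCast, mem_getD t N (N - 2) (by omega) hN]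
        by_cases h5 : (5:Int) ≤ (((N + 1):Nat) : Int)
        · have hn5 : 4 ≤ N := by omega
          have i5 : ((((N + 1):Nat) : Int) - 5) = (((N - 4 : Nat)) : Int) := by omega
          have g5 : PySem.List.pyGetD (List.map (sommeMinRec t) (List.range (N + 1)) ++ List.drop (N + 1) t) ((((N + 1):Nat) : Int) - 5) 0 = sommeMinRec t (N - 4) := by
            rw [i5, PySem.List.pyGetD_natCast, mem_getD t N (N - 4) (by omega) hN]
          rw [if_pos h3, if_pos h5, g3, g5]
          refine hset _ ?_
          rw [rec_succ, if_pos (by omega : 3 ≤ N + 1), if_pos (by omega : 5 ≤ N + 1)]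
          simp [PySem.List.min?_id_cons]
        · rw [if_pos h3, if_neg h5, g3]
          refine hset _ ?_
          rw [rec_succ, if_pos (by omega : 3 ≤ N + 1), if_neg (by omega : ¬ 5 ≤ N + 1)]
          simp [PySem.List.min?_id_cons]
      · rw [if_neg h3]
        refine hset _ ?_
        rw [rec_succ, if_neg (by omega : ¬ 3 ≤ N + 1)]
        simp [PySem.List.min?_id_cons]

-- ===== VERDICT =====
theorem sommeMin_spec : Claim_equal_sommeMin := by
  intro t n _ hpre
  obtain ⟨h0, hlen⟩ := hpre
  obtain ⟨N, rfl⟩ : ∃ N : Nat, n = (N : Int) := ⟨n.toNat, by omega⟩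
  have hN : N < t.length := by omega
  simp only [Spec_sommeMin, sommeMin, sommeMin_alt, PySem.List.slice_none_none, Int.toNat_natCast]
  rw [a_loop t N hN, PySem.List.pyGetD_natCast, mem_getD t N N le_rfl hN]
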